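-- pv_equiv track=rewrite | github.com/datormx/DinamicaEstocasticaPython | barajas2.py | obtener_corridas
-- ===== SOURCE A (Python) =====
-- def obtener_corridas(manos):
--     corridas = 0
--     for mano in manos:
--         valores = []
--         for carta in mano:
--             valores.append(carta[1])
--
--         valores.sort() #Ordena la mano por sus valores para comprobar si son corrida.
--
--         es_corrida = True
--         for i in range(len(valores) - 1):  #recorre la mano para verificar si cada carta siguiente es mayor por 1 a la anterior. De serlo en todas las cartas será corrida
--             if valores[i] != valores[i+1] - 1:
--                 es_corrida = False
--
--         if es_corrida:
--             corridas += 1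
--
--     return corridas
-- ===== SOURCE B (Python) =====
-- def obtener_corridas(manos):
--     corridas = 0
--     for mano in manos:
--         valores = [carta[1] for carta in mano]
--         n = len(valores)
--         if n <= 1 or (len(set(valores)) == n and max(valores) - min(valores) == n - 1):
--             corridas += 1
--     return corridas
-- ===== Notes on version B (the rewrite author's own statement) =====
-- stated objective: alternative
-- what changed: Per hand, instead of sorting the values and scanning adjacent pairs, B checks distinctness via a set plus max-min == len-1 (empty/singleton hands count as runs, as in A); no sort, no adjacent scan.
import Mathlib
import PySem

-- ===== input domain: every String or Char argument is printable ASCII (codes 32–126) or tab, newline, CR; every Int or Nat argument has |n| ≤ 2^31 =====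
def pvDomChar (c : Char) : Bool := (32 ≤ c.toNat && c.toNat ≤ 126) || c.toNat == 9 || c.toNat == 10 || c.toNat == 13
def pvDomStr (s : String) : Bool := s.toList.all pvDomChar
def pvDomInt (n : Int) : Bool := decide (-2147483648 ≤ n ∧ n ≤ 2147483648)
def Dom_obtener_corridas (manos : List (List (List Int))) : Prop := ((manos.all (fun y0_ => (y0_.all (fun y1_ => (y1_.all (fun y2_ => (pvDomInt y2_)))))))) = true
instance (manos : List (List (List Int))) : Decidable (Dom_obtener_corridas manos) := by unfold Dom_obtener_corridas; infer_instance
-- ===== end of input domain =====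

-- B replaces A's per-hand sort + adjacent-pair scan by a set-based distinctness test plus a max-min span check (alternative algorithm, same result).


-- ===== PORT A =====
-- carta[1] is ported as pyGetD carta 1 0: exact under Pre_ (cards of length ≥ 2); the
-- in-loop indices i, i+1 lie in [0, len-1] so pyGetD is exact there unconditionally.
def obtener_corridas (manos : List (List (List Int))) : Int :=
  manos.foldl (fun corridas mano =>
    let valores := mano.foldl (fun acc carta => acc ++ [PySem.List.pyGetD carta 1 0]) []
    let valores := PySem.List.sorted valores (fun x => x) false
    let es_corrida := (PySem.List.pyRange 0 (PySem.List.len valores - 1) 1).foldl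
      (fun es i => if PySem.List.pyGetD valores i 0 ≠ PySem.List.pyGetD valores (i + 1) 0 - 1
                   then false else es) true
    if es_corrida then corridas + 1 else corridas) 0

-- ===== PORT B =====
def obtener_corridas_alt (manos : List (List (List Int))) : Int :=
  manos.foldl (fun corridas mano =>
    let valores := mano.map (fun carta => PySem.List.pyGetD carta 1 0)
    let n := PySem.List.len valores
    if n ≤ 1 ∨ ((PySem.Set.ofList valores).length = valores.length ∧
        (PySem.List.max? valores (fun x => x)).getD 0
          - (PySem.List.min? valores (fun x => x)).getD 0 = n - 1)
    then corridas + 1 else corridas) 0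

-- ===== PRECONDITION & SPEC =====
-- Pre_ excludes exactly the inputs where Python A raises IndexError: a card with fewer than 2 entries (carta[1]).
def Pre_obtener_corridas (manos : List (List (List Int))) : Prop :=
  ∀ mano ∈ manos, ∀ carta ∈ mano, 2 ≤ carta.length
instance (manos : List (List (List Int))) : Decidable (Pre_obtener_corridas manos) := by
  unfold Pre_obtener_corridas; infer_instance
def pvWitness_obtener_corridas : List (List (List Int)) := [[[0, 5], [1, 7], [2, 6]], []]
def Spec_obtener_corridas (manos : List (List (List Int))) (out : Int) : Prop := out = obtener_corridas_alt manos
instance (manos : List (List (List Int))) (out : Int) : Decidable (Spec_obtener_corridas manos out) := by unfold Spec_obtener_corridas; infer_instance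

-- ===== CLAIM (what is proved, stated in full; the proofs are below) =====
def Claim_equal_obtener_corridas : Prop := ∀ (manos : List (List (List Int))), Dom_obtener_corridas manos → Pre_obtener_corridas manos → Spec_obtener_corridas manos (obtener_corridas manos)

-- ===== LEMMAS AND PROOFS =====

theorem gapLower (s : List Int)
    (hstep : ∀ k : Nat, (hk : k + 1 < s.length) → s[k]'(by omega) + 1 ≤ s[k + 1]'hk) :
    ∀ i j : Nat, (hij : i ≤ j) → (hj : j < s.length) → s[i]'(by omega) + ((j - i : Nat) : Int) ≤ s[j]'hj := by
  intro i j
  induction j with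
  | zero => intro hij hj; interval_cases i; simp
  | succ j ih =>
    intro hij hj
    rcases Nat.lt_or_ge i (j + 1) with hlt | hge
    · have h1 := ih (by omega) (by omega)
      have h2 := hstep j hj
      have : ((j + 1 - i : Nat) : Int) = ((j - i : Nat) : Int) + 1 := by omega
      omega
    · have : i = j + 1 := by omega
      subst this; simp

theorem chainEq (s : List Int)
    (hchain : ∀ k : Nat, (hk : k + 1 < s.length) → s[k + 1]'hk = s[k]'(by omega) + 1) :
    ∀ j : Nat, (hj : j < s.length) → s[j]'hj = s[0]'(by omega) + (j : Int) := by
  intro j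
  induction j with
  | zero => intro hj; simp
  | succ j ih =>
    intro hj
    have h1 := ih (by omega)
    have h2 := hchain j hj
    omega

theorem sorted_max_eq (vals : List Int) (h2 : vals ≠ []) :
    (PySem.List.max? vals (fun x => x)).getD 0
      = (PySem.List.sorted vals (fun x => x) false)[vals.length - 1]'(by
          rw [PySem.List.length_sorted]; exact Nat.sub_lt (List.length_pos_iff.mpr h2) one_pos) := by
  have hlen := PySem.List.length_sorted vals (fun x => x) false
  have hperm := PySem.List.sorted_perm vals (fun x => x) false
  cases h : PySem.List.max? vals (fun x => x) with
  | none => exact absurd ((PySem.List.max?_eq_none_iff vals _).mp h) h2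
  | some m =>
    have hmem : m ∈ vals := PySem.List.max?_mem h
    have hmax := PySem.List.max?_isMax h
    have hmem' : m ∈ PySem.List.sorted vals (fun x => x) false := hperm.mem_iff.mpr hmem
    obtain ⟨j, hj, hje⟩ := List.mem_iff_getElem.mp hmem'
    have hle1 : m ≤ (PySem.List.sorted vals (fun x => x) false)[vals.length - 1]'(by omega) := by
      rw [← hje]
      exact PySem.List.sorted_id_getElem_mono vals (by omega) (by omega)
    have hle2 : (PySem.List.sorted vals (fun x => x) false)[vals.length - 1]'(by omega) ≤ m :=
      hmax _ (hperm.mem_iff.mp (List.getElem_mem _))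
    simp [le_antisymm hle1 hle2]

theorem sorted_min_eq (vals : List Int) (h2 : vals ≠ []) :
    (PySem.List.min? vals (fun x => x)).getD 0
      = (PySem.List.sorted vals (fun x => x) false)[0]'(by
          rw [PySem.List.length_sorted]; exact List.length_pos_iff.mpr h2) := by
  have hlen := PySem.List.length_sorted vals (fun x => x) false
  have hperm := PySem.List.sorted_perm vals (fun x => x) false
  cases h : PySem.List.min? vals (fun x => x) with
  | none => exact absurd ((PySem.List.min?_eq_none_iff vals _).mp h) h2
  | some m =>
    have hmem : m ∈ vals := PySem.List.min?_mem h
    have hmin := PySem.List.min?_isMin h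
    have hmem' : m ∈ PySem.List.sorted vals (fun x => x) false := hperm.mem_iff.mpr hmem
    obtain ⟨j, hj, hje⟩ := List.mem_iff_getElem.mp hmem'
    have hle1 : (PySem.List.sorted vals (fun x => x) false)[0]'(by omega) ≤ m := by
      rw [← hje]
      exact PySem.List.sorted_id_getElem_mono vals (by omega) (by omega)
    have hle2 : m ≤ (PySem.List.sorted vals (fun x => x) false)[0]'(by omega) :=
      hmin _ (hperm.mem_iff.mp (List.getElem_mem _))
    simp [le_antisymm hle2 hle1]

theorem setlen_iff_nodup (xs : List Int) :
    (PySem.Set.ofList xs).length = xs.length ↔ xs.Nodup := by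
  constructor
  · intro h
    have h1 : (PySem.Set.ofList xs).Nodup := PySem.Set.nodup_ofList xs
    have h2 : (PySem.Set.ofList xs).toFinset = xs.toFinset := by
      ext x; simp [PySem.Set.mem_ofList]
    have h4 : xs.toFinset.card = xs.length := by
      rw [← h2, List.toFinset_card_of_nodup h1, h]
    have h5 := Multiset.toFinset_card_eq_card_iff_nodup (m := (xs : Multiset Int))
    simp at h5
    exact h5.mp h4
  · intro h; rw [PySem.Set.ofList_eq_self_of_nodup xs h]


theorem hand_core (vals s : List Int) (hs : s = PySem.List.sorted vals (fun x => x) false) :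
    ((∀ k : Nat, (hk : k + 1 < s.length) → s[k + 1]'hk = s[k]'(by omega) + 1))
    ↔ (PySem.List.len vals ≤ 1 ∨ ((PySem.Set.ofList vals).length = vals.length ∧
        (PySem.List.max? vals (fun x => x)).getD 0
          - (PySem.List.min? vals (fun x => x)).getD 0 = PySem.List.len vals - 1)) := by
  have hlen : s.length = vals.length := by
    rw [hs, PySem.List.length_sorted]
  have hperm : s.Perm vals := by rw [hs]; exact PySem.List.sorted_perm vals _ false
  have hmono : ∀ p q : Nat, (hpq : p ≤ q) → (hq : q < s.length) → s[p]'(by omega) ≤ s[q]'hq := by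
    subst hs; intro p q hpq hq; exact PySem.List.sorted_id_getElem_mono vals hpq hq
  simp only [PySem.List.len_eq, setlen_iff_nodup]
  by_cases hn : vals.length ≤ 1
  · constructor
    · intro _; left; exact_mod_cast Nat.cast_le.mpr hn
    · intro _ k hk; omega
  · have hne : vals ≠ [] := by intro h; subst h; simp at hn
    have hmax : (PySem.List.max? vals (fun x => x)).getD 0 = s[vals.length - 1]'(by omega) := by
      subst hs; exact sorted_max_eq vals hne
    have hmin : (PySem.List.min? vals (fun x => x)).getD 0 = s[0]'(by omega) := by
      subst hs; exact sorted_min_eq vals hne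
    constructor
    · intro hchain
      have heq := chainEq s hchain
      have hndps : s.Nodup := by
        apply List.pairwise_iff_getElem.mpr
        intro i j hi hj hij
        have h1 := heq i (by omega)
        have h2 := heq j (by omega)
        omega
      right
      refine ⟨hperm.nodup_iff.mp hndps, ?_⟩
      rw [hmax, hmin, heq (vals.length - 1) (by omega), heq 0 (by omega)]
      omega
    · intro h
      rcases h with h | ⟨hnd, hspan⟩
      · omega
      have hndps : s.Nodup := hperm.nodup_iff.mpr hnd
      have hstep : ∀ k : Nat, (hk : k + 1 < s.length) → s[k]'(by omega) + 1 ≤ s[k + 1]'hk := by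
        intro k hk
        have hle := hmono k (k + 1) (by omega) hk
        have hne2 : s[k]'(by omega) ≠ s[k + 1]'hk := by
          intro hcontra
          have := (List.Nodup.getElem_inj_iff hndps).mp hcontra
          omega
        omega
      rw [hmax, hmin] at hspan
      intro k hk
      have h1 := gapLower s hstep 0 k (by omega) (by omega)
      have h2 := gapLower s hstep (k + 1) (vals.length - 1) (by omega) (by omega)
      have h3 := hstep k hk
      omega

-- A's flag loop over the sorted list, as a universally quantified chain condition
theorem chain_fold (s : List Int) :
    ((PySem.List.pyRange 0 (PySem.List.len s - 1) 1).foldl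
      (fun es i => if PySem.List.pyGetD s i 0 ≠ PySem.List.pyGetD s (i + 1) 0 - 1
                   then false else es) true) = true
    ↔ (∀ k : Nat, (hk : k + 1 < s.length) → s[k + 1]'hk = s[k]'(by omega) + 1) := by
  rw [show (fun (es : Bool) (i : Int) => if PySem.List.pyGetD s i 0 ≠ PySem.List.pyGetD s (i + 1) 0 - 1
                   then false else es)
      = (fun es i => if (fun i => decide (PySem.List.pyGetD s i 0 ≠ PySem.List.pyGetD s (i + 1) 0 - 1)) i = true then false else es) from by
    funext es i; simp]
  rw [PySem.List.foldl_if_false_eq]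
  simp only [Bool.true_and, Bool.not_eq_eq_eq_not, Bool.not_true, List.any_eq_false,
    PySem.List.mem_pyRange_one, PySem.List.len_eq]
  constructor
  · intro h k hk
    have hm := h (k : Int) ⟨by omega, by omega⟩
    rw [PySem.List.pyGetD_eq_getElem s 0 (by omega) (by omega),
        PySem.List.pyGetD_eq_getElem s 0 (by omega) (by omega)] at hm
    simp only [Int.toNat_natCast, show ((k : Int) + 1).toNat = k + 1 from by omega,
      decide_eq_true_eq] at hm
    omega
  · intro h i ⟨h0, h1⟩
    rw [PySem.List.pyGetD_eq_getElem s 0 (by omega) (by omega),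
        PySem.List.pyGetD_eq_getElem s 0 (by omega) (by omega)]
    simp only [show (i + 1).toNat = i.toNat + 1 from by omega, decide_eq_true_eq]
    have hm := h i.toNat (by omega)
    omega

-- per-hand agreement of the two counted conditions
theorem hand_eq (acc : Int) (mano : List (List Int)) :
    (let valores := mano.foldl (fun acc carta => acc ++ [PySem.List.pyGetD carta 1 0]) []
     let valores := PySem.List.sorted valores (fun x => x) false
     let es_corrida := (PySem.List.pyRange 0 (PySem.List.len valores - 1) 1).foldl
       (fun es i => if PySem.List.pyGetD valores i 0 ≠ PySem.List.pyGetD valores (i + 1) 0 - 1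
                    then false else es) true
     if es_corrida then acc + 1 else acc)
    = (let valores := mano.map (fun carta => PySem.List.pyGetD carta 1 0)
       let n := PySem.List.len valores
       if n ≤ 1 ∨ ((PySem.Set.ofList valores).length = valores.length ∧
           (PySem.List.max? valores (fun x => x)).getD 0
             - (PySem.List.min? valores (fun x => x)).getD 0 = n - 1)
       then acc + 1 else acc) := by
  simp only [PySem.List.foldl_append_singleton_eq_map, List.nil_append]
  apply if_congr _ rfl rfl
  exact (chain_fold _).trans (hand_core _ _ rfl)

-- ===== VERDICT (by name: the statement is the Claim_ definition above) =====
theorem obtener_corridas_spec : Claim_equal_obtener_corridas := by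
  intro manos _ _
  unfold Spec_obtener_corridas obtener_corridas obtener_corridas_alt
  exact PySem.List.foldl_congr_mem manos _ _ 0 (fun acc mano _ => hand_eq acc mano)
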